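-- pv_equiv track=rewrite | github.com/LyanKaleu/DOT-366-IFPI | Lista-3/Q15.py | lista_tuplas_frequencia
-- ===== SOURCE A (Python) =====
-- def frequencia_elemento(lista, numero):
--     contador = 0
--
--     for elemento in lista:
--         if elemento == numero:
--             contador += 1
--
--     return contador
--
-- def lista_tuplas_frequencia(lista):
--     frequencia_elementos = []
--     elementos_adicionados = []
--     for elemento in lista:
--         if elemento not in elementos_adicionados:
--             frequencia = frequencia_elemento(lista, elemento)
--             frequencia_elementos.append((elemento, frequencia))
--             elementos_adicionados.append(elemento)
--
--     return frequencia_elementos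
-- ===== SOURCE B (Python) =====
-- def lista_tuplas_frequencia(lista):
--     acc = []  # list of [element, count] pairs, first-appearance order
--     for elemento in lista:
--         for par in acc:
--             if par[0] == elemento:
--                 par[1] += 1
--                 break
--         else:
--             acc.append([elemento, 1])
--     return [(el, c) for el, c in acc]
-- ===== Notes on version B (the rewrite author's own statement) =====
-- stated objective: faster
-- what changed: Single pass maintaining running [element,count] pairs (increment on first match, append otherwise) instead of re-scanning the whole list with frequencia_elemento for every new element.
import Mathlib
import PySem

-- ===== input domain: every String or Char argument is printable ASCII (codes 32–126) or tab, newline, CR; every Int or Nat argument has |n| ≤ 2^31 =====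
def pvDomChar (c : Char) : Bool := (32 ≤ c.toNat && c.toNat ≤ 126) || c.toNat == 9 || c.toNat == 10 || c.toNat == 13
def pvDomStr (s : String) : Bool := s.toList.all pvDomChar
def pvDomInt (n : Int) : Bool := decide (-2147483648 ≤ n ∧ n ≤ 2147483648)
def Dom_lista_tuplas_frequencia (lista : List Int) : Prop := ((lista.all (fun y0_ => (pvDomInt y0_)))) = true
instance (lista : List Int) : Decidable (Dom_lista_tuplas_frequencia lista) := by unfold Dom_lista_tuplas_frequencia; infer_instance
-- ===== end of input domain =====

-- B replaces A's re-scan of the whole list per new element by a single pass over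
-- running (element, count) pairs: faster by a constant-factor mechanism (no full count pass per distinct element).


-- ===== PORT A =====
def frequencia_elemento (lista : List Int) (numero : Int) : Int :=
  lista.foldl (fun contador elemento => if elemento == numero then contador + 1 else contador) 0

def lista_tuplas_frequencia (lista : List Int) : List (Int × Int) :=
  (lista.foldl
    (fun (st : List (Int × Int) × List Int) elemento =>
      if elemento ∈ st.2 then st
      else (st.1 ++ [(elemento, frequencia_elemento lista elemento)], st.2 ++ [elemento]))
    ([], [])).1

-- ===== PORT B =====
-- linear scan of the accumulator: first matching pair gets its count bumped, else append (e,1)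
def pvBump : List (Int × Int) → Int → List (Int × Int)
  | [], e => [(e, 1)]
  | (x, c) :: rest, e => if x == e then (x, c + 1) :: rest else (x, c) :: pvBump rest e

def lista_tuplas_frequencia_alt (lista : List Int) : List (Int × Int) :=
  lista.foldl pvBump []

-- ===== PRECONDITION & SPEC =====
def Spec_lista_tuplas_frequencia (lista : List Int) (out : List (Int × Int)) : Prop := out = lista_tuplas_frequencia_alt lista
instance (lista : List Int) (out : List (Int × Int)) : Decidable (Spec_lista_tuplas_frequencia lista out) := by unfold Spec_lista_tuplas_frequencia; infer_instance

-- ===== CLAIM (what is proved, stated in full; the proofs are below) =====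
def Claim_equal_lista_tuplas_frequencia : Prop := ∀ (lista : List Int), Dom_lista_tuplas_frequencia lista → Spec_lista_tuplas_frequencia lista (lista_tuplas_frequencia lista)

-- ===== LEMMAS AND PROOFS =====

-- first-appearance key list
def pvKeys (acc : List Int) (l : List Int) : List Int :=
  l.foldl (fun ks e => if e ∈ ks then ks else ks ++ [e]) acc

theorem pvKeys_nil (acc : List Int) : pvKeys acc [] = acc := rfl

theorem pvKeys_cons (acc : List Int) (e : Int) (l : List Int) :
    pvKeys acc (e :: l) = pvKeys (if e ∈ acc then acc else acc ++ [e]) l := rfl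

theorem mem_pvKeys (acc l : List Int) (x : Int) :
    x ∈ pvKeys acc l ↔ x ∈ acc ∨ x ∈ l := by
  induction l generalizing acc with
  | nil => simp [pvKeys_nil]
  | cons e t ih =>
    rw [pvKeys_cons, ih]
    by_cases h : e ∈ acc
    · simp only [if_pos h, List.mem_cons]
      constructor
      · rintro (h' | h')
        · exact Or.inl h'
        · exact Or.inr (Or.inr h')
      · rintro (h' | h' | h')
        · exact Or.inl h'
        · exact Or.inl (h' ▸ h)
        · exact Or.inr h'
    · simp only [if_neg h, List.mem_append, List.mem_cons]
      tauto

theorem nodup_pvKeys (acc l : List Int) (h : acc.Nodup) : (pvKeys acc l).Nodup := by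
  induction l generalizing acc with
  | nil => simpa [pvKeys_nil]
  | cons e t ih =>
    rw [pvKeys_cons]
    apply ih
    by_cases he : e ∈ acc <;> simp [he, List.Nodup.append, h]

theorem pvKeys_sub (acc l : List Int) (x : Int) (hx : x ∈ pvKeys [] l) : x ∈ l := by
  have := (mem_pvKeys [] l x).mp hx
  simpa using this

-- frequencia_elemento with an arbitrary starting counter
theorem freq_start (l : List Int) (numero : Int) (c0 : Int) :
    l.foldl (fun contador elemento => if elemento == numero then contador + 1 else contador) c0 = c0 + frequencia_elemento l numero := by
  induction l generalizing c0 with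
  | nil => simp [frequencia_elemento]
  | cons e t ih =>
    simp only [frequencia_elemento, List.foldl_cons]
    rw [ih, ih]
    split_ifs <;> omega

theorem freq_append (p : List Int) (x numero : Int) :
    frequencia_elemento (p ++ [x]) numero = frequencia_elemento p numero + (if x = numero then 1 else 0) := by
  show (p ++ [x]).foldl _ 0 = _
  rw [List.foldl_append, List.foldl_cons, List.foldl_nil]
  by_cases h : x = numero
  · rw [if_pos (by simpa using h), freq_start, if_pos h]
    omega
  · rw [if_neg (by simpa using h), if_neg h, add_zero]
    rfl

theorem freq_not_mem (p : List Int) (numero : Int) (h : numero ∉ p) :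
    frequencia_elemento p numero = 0 := by
  induction p with
  | nil => rfl
  | cons e t ih =>
    have hx : e ≠ numero := fun hx => h (by simp [hx])
    have ht : numero ∉ t := fun hm => h (by simp [hm])
    show (e :: t).foldl _ 0 = 0
    rw [List.foldl_cons]
    have h0 : (if e == numero then (0 : Int) + 1 else 0) = 0 := by simp [hx]
    rw [h0]
    exact ih ht

-- A's fold, characterised: the pair list is pvKeys mapped through the full-list frequency
theorem A_fold (lista rest : List Int) (ks : List Int) :
    rest.foldl
      (fun (st : List (Int × Int) × List Int) elemento =>
        if elemento ∈ st.2 then st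
        else (st.1 ++ [(elemento, frequencia_elemento lista elemento)], st.2 ++ [elemento]))
      (ks.map (fun e => (e, frequencia_elemento lista e)), ks)
    = ((pvKeys ks rest).map (fun e => (e, frequencia_elemento lista e)), pvKeys ks rest) := by
  induction rest generalizing ks with
  | nil => simp [pvKeys_nil]
  | cons e t ih =>
    rw [List.foldl_cons, pvKeys_cons]
    by_cases h : e ∈ ks
    · simpa [h] using ih ks
    · have := ih (ks ++ [e])
      simpa [h] using this

theorem A_char (lista : List Int) :
    lista_tuplas_frequencia lista = (pvKeys [] lista).map (fun e => (e, frequencia_elemento lista e)) := by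
  unfold lista_tuplas_frequencia
  have := A_fold lista lista []
  simp only [List.map_nil] at this
  rw [this]

-- bumping a mapped key list
theorem bump_map (ks : List Int) (c : Int → Int) (e : Int) (hnd : ks.Nodup) :
    pvBump (ks.map (fun k => (k, c k))) e =
      if e ∈ ks then ks.map (fun k => (k, c k + (if e = k then 1 else 0)))
      else ks.map (fun k => (k, c k)) ++ [(e, 1)] := by
  induction ks with
  | nil => simp [pvBump]
  | cons k t ih =>
    simp only [List.map_cons, pvBump]
    by_cases hk : k = e
    · subst hk
      have hkt : k ∉ t := (List.nodup_cons.mp hnd).1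
      have hmap : t.map (fun a => (a, c a + if k = a then 1 else 0)) = t.map (fun a => (a, c a)) := by
        apply List.map_congr_left
        intro a ha
        have hne : k ≠ a := fun h' => hkt (h' ▸ ha)
        simp [hne]
      simp [hmap]
    · have hne : e ≠ k := fun h' => hk h'.symm
      rw [if_neg (by simpa using hk), ih (List.nodup_cons.mp hnd).2]
      by_cases he : e ∈ t <;> simp [he, hne]

-- B's fold, characterised
theorem B_fold (l p : List Int) :
    l.foldl pvBump ((pvKeys [] p).map (fun k => (k, frequencia_elemento p k)))
    = (pvKeys [] (p ++ l)).map (fun k => (k, frequencia_elemento (p ++ l) k)) := by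
  induction l generalizing p with
  | nil => simp
  | cons e t ih =>
    rw [List.foldl_cons,
        bump_map (pvKeys [] p) (fun k => frequencia_elemento p k) e (nodup_pvKeys [] p (by simp))]
    have hkeys : pvKeys [] (p ++ [e]) =
        if e ∈ pvKeys [] p then pvKeys [] p else pvKeys [] p ++ [e] := by
      simp [pvKeys, List.foldl_append]
    by_cases he : e ∈ pvKeys [] p
    · have hstep : (pvKeys [] p).map (fun k => (k, frequencia_elemento p k + (if e = k then 1 else 0)))
          = (pvKeys [] (p ++ [e])).map (fun k => (k, frequencia_elemento (p ++ [e]) k)) := by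
        rw [hkeys, if_pos he]
        apply List.map_congr_left
        intro a _
        rw [freq_append]
      rw [if_pos he, hstep]
      have := ih (p ++ [e])
      simpa [List.append_assoc] using this
    · have hmem : e ∉ p := fun h => he ((mem_pvKeys [] p e).mpr (Or.inr h))
      have hstep : (pvKeys [] p).map (fun k => (k, frequencia_elemento p k)) ++ [(e, 1)]
          = (pvKeys [] (p ++ [e])).map (fun k => (k, frequencia_elemento (p ++ [e]) k)) := by
        rw [hkeys, if_neg he, List.map_append]
        congr 1
        · apply List.map_congr_left
          intro a ha
          have haP : a ∈ p := pvKeys_sub [] p a ha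
          have : e ≠ a := fun h => hmem (h ▸ haP)
          rw [freq_append, if_neg this, add_zero]
        · simp [freq_append, freq_not_mem p e hmem]
      rw [if_neg he, hstep]
      have := ih (p ++ [e])
      simpa [List.append_assoc] using this

theorem B_char (lista : List Int) :
    lista_tuplas_frequencia_alt lista = (pvKeys [] lista).map (fun e => (e, frequencia_elemento lista e)) := by
  unfold lista_tuplas_frequencia_alt
  have := B_fold lista []
  simpa using this

-- ===== VERDICT (by name: the statement is the Claim_ definition above) =====
theorem lista_tuplas_frequencia_spec : Claim_equal_lista_tuplas_frequencia := by
  intro lista _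
  unfold Spec_lista_tuplas_frequencia
  rw [A_char, B_char]
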